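-- pv_equiv track=rewrite | github.com/sumwor/matching_pennies | python/matchpennies/readtxt.py | choicereward_counting
-- ===== SOURCE A (Python) =====
-- def choicereward_counting(choiceHistory, rewardHistory, num):
--
--     leftCount=0
--     rightCount=0
--
--     if num==0:
--         for i in range(len(choiceHistory)):
--             if choiceHistory[i] == 2:
--                 leftCount+=1
--             elif choiceHistory[i]==3:
--                 rightCount+=1
--     else:
--         comb=choiceHistory[-num:]
--         combre=rewardHistory[-num:]
--
--
--         for i in range(len(choiceHistory)-num):
--             if choiceHistory[i:i+num] == comb:
--                 if rewardHistory[i:i+num] == combre: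
--                     if choiceHistory[i+num] == 2:
--                         leftCount+=1
--                     elif choiceHistory[i+num]==3:
--                         rightCount+=1
--
--     return leftCount, rightCount
-- ===== SOURCE B (Python) =====
-- def choicereward_counting(choiceHistory, rewardHistory, num):
--     # Build a counter keyed by (choice-window, reward-window, next choice) in one pass,
--     # then answer with two lookups of the suffix pattern key.
--     if num == 0:
--         return choiceHistory.count(2), choiceHistory.count(3)
--     counts = {}
--     for i in range(len(choiceHistory) - num):
--         key = (tuple(choiceHistory[i:i + num]),
--                tuple(rewardHistory[i:i + num]),
--                choiceHistory[i + num])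
--         counts[key] = counts.get(key, 0) + 1
--     comb = tuple(choiceHistory[-num:])
--     combre = tuple(rewardHistory[-num:])
--     return (counts.get((comb, combre, 2), 0),
--             counts.get((comb, combre, 3), 0))
-- ===== Notes on version B (the rewrite author's own statement) =====
-- stated objective: alternative
-- what changed: B replaces A's loop of repeated slice-vs-pattern comparisons with nested branches by a single pass that builds a dict counter keyed by (choice-window, reward-window, next choice) and then answers with two lookups of the suffix-pattern key; the num==0 branch uses list.count.
-- outside the precondition, e.g. on choicereward_counting([4], [1, 1, 1, 0, 1, 1, 0], -2): A returns (0, 0), B raises IndexError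
import Mathlib
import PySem

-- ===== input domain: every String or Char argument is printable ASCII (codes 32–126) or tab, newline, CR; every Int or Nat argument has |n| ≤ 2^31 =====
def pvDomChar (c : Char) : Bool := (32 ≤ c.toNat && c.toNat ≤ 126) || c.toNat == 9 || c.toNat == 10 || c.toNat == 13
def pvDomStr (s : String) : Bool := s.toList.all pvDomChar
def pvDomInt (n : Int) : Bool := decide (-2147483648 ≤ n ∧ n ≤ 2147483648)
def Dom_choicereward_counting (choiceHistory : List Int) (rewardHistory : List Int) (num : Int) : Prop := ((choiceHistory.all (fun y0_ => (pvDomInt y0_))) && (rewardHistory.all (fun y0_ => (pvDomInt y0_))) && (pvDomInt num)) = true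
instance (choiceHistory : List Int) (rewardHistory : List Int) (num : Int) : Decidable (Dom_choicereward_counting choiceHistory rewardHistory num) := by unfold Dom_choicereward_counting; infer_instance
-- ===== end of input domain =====

-- B builds a dict counter keyed by (choice-window, reward-window, next choice) in one pass
-- and answers with two lookups of the suffix-pattern key, instead of A's repeated
-- slice-vs-pattern comparisons with nested branches (objective: alternative).


-- ===== PORT A =====
def choicereward_counting (choiceHistory : List Int) (rewardHistory : List Int) (num : Int) : Int × Int :=
  if num == 0 then
    (PySem.List.pyRange 0 (choiceHistory.length : Int) 1).foldl
      (fun (lr : Int × Int) i =>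
        if PySem.List.pyGetD choiceHistory i 0 == 2 then (lr.1 + 1, lr.2)
        else if PySem.List.pyGetD choiceHistory i 0 == 3 then (lr.1, lr.2 + 1)
        else lr) (0, 0)
  else
    let comb := PySem.List.slice choiceHistory (some (-num)) none
    let combre := PySem.List.slice rewardHistory (some (-num)) none
    (PySem.List.pyRange 0 ((choiceHistory.length : Int) - num) 1).foldl
      (fun (lr : Int × Int) i =>
        if PySem.List.slice choiceHistory (some i) (some (i + num)) == comb then
          if PySem.List.slice rewardHistory (some i) (some (i + num)) == combre then
            if PySem.List.pyGetD choiceHistory (i + num) 0 == 2 then (lr.1 + 1, lr.2)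
            else if PySem.List.pyGetD choiceHistory (i + num) 0 == 3 then (lr.1, lr.2 + 1)
            else lr
          else lr
        else lr) (0, 0)

-- ===== PORT B =====
def choicereward_counting_alt (choiceHistory : List Int) (rewardHistory : List Int) (num : Int) : Int × Int :=
  if num == 0 then
    ((PySem.List.count choiceHistory 2 : Int), (PySem.List.count choiceHistory 3 : Int))
  else
    let counts : PySem.Dict (List Int × List Int × Int) Int :=
      (PySem.List.pyRange 0 ((choiceHistory.length : Int) - num) 1).foldl
        (fun d i =>
          d.insert (PySem.List.slice choiceHistory (some i) (some (i + num)),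
                    PySem.List.slice rewardHistory (some i) (some (i + num)),
                    PySem.List.pyGetD choiceHistory (i + num) 0)
            (d.getD (PySem.List.slice choiceHistory (some i) (some (i + num)),
                     PySem.List.slice rewardHistory (some i) (some (i + num)),
                     PySem.List.pyGetD choiceHistory (i + num) 0) 0 + 1)) PySem.Dict.empty
    let comb := PySem.List.slice choiceHistory (some (-num)) none
    let combre := PySem.List.slice rewardHistory (some (-num)) none
    (counts.getD (comb, combre, 2) 0, counts.getD (comb, combre, 3) 0)

-- ===== PRECONDITION & SPEC =====
-- Pre_ excludes num < -len(choiceHistory): there A's next-choice index choiceHistory[i+num] is out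
-- of range, so A raises IndexError unless every window comparison fails (empty pattern vs unequal
-- reward windows), in which case it returns (0, 0); natural B, whose key computation always
-- performs that indexing, raises IndexError there.
def Pre_choicereward_counting (choiceHistory : List Int) (rewardHistory : List Int) (num : Int) : Prop :=
  -(choiceHistory.length : Int) ≤ num
instance (choiceHistory : List Int) (rewardHistory : List Int) (num : Int) : Decidable (Pre_choicereward_counting choiceHistory rewardHistory num) := by unfold Pre_choicereward_counting; infer_instance
def pvWitness_choicereward_counting : List Int × List Int × Int := ([2, 3, 2, 2], [1, 0, 1, 1], 1)

def Spec_choicereward_counting (choiceHistory : List Int) (rewardHistory : List Int) (num : Int) (out : Int × Int) : Prop := out = choicereward_counting_alt choiceHistory rewardHistory num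
instance (choiceHistory : List Int) (rewardHistory : List Int) (num : Int) (out : Int × Int) : Decidable (Spec_choicereward_counting choiceHistory rewardHistory num out) := by unfold Spec_choicereward_counting; infer_instance

-- ===== CLAIM (what is proved, stated in full; the proofs are below) =====
def Claim_equal_choicereward_counting : Prop := ∀ (choiceHistory : List Int) (rewardHistory : List Int) (num : Int), Dom_choicereward_counting choiceHistory rewardHistory num → Pre_choicereward_counting choiceHistory rewardHistory num → Spec_choicereward_counting choiceHistory rewardHistory num (choicereward_counting choiceHistory rewardHistory num)

-- ===== LEMMAS AND PROOFS =====

-- A generic branch-counting loop: it adds the number of indices whose key is 't2' to the left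
-- counter and the number whose key is 't3' to the right counter.
theorem foldA_counts {K : Type} [BEq K] [LawfulBEq K] (l : List Int) (k : Int → K) (t2 t3 : K)
    (hne : t2 ≠ t3) (a b : Int) :
    l.foldl (fun (lr : Int × Int) i =>
        if k i == t2 then (lr.1 + 1, lr.2)
        else if k i == t3 then (lr.1, lr.2 + 1)
        else lr) (a, b)
      = (a + ((l.map k).count t2 : Int), b + ((l.map k).count t3 : Int)) := by
  induction l generalizing a b with
  | nil => simp
  | cons x t ih =>
    simp only [List.foldl_cons]
    by_cases h2 : k x = t2
    · rw [if_pos (show (k x == t2) = true by simp [h2]), ih, List.map_cons, h2,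
        List.count_cons_self, List.count_cons_of_ne hne, Prod.mk.injEq]
      push_cast
      constructor <;> ring
    · by_cases h3 : k x = t3
      · rw [if_neg (show ¬ (k x == t2) = true by simp [h2]),
          if_pos (show (k x == t3) = true by simp [h3]), ih, List.map_cons, h3,
          List.count_cons_of_ne (Ne.symm hne), List.count_cons_self, Prod.mk.injEq]
        push_cast
        constructor <;> ring
      · rw [if_neg (show ¬ (k x == t2) = true by simp [h2]),
          if_neg (show ¬ (k x == t3) = true by simp [h3]), ih, List.map_cons,
          List.count_cons_of_ne h2, List.count_cons_of_ne h3]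

-- A's num≠0 loop, characterised: the nested slice/branch tests count exactly the indices whose
-- (choice-window, reward-window, next-choice) key equals the pattern key with next choice 2 resp. 3.
theorem foldA_nested (l : List Int) (sc sr : Int → List Int) (g : Int → Int)
    (c cr : List Int) (a b : Int) :
    l.foldl (fun (lr : Int × Int) i =>
        if sc i = c then
          if sr i = cr then
            if g i = 2 then (lr.1 + 1, lr.2)
            else if g i = 3 then (lr.1, lr.2 + 1)
            else lr
          else lr
        else lr) (a, b)
      = (a + ((l.map fun i => (sc i, sr i, g i)).count (c, cr, 2) : Int),
         b + ((l.map fun i => (sc i, sr i, g i)).count (c, cr, 3) : Int)) := by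
  have h := foldA_counts l (fun i => (sc i, sr i, g i)) (c, cr, 2) (c, cr, 3) (by simp) a b
  rw [← h]
  apply PySem.List.foldl_congr_mem
  intro lr i _
  by_cases hc : sc i = c
  · by_cases hr : sr i = cr
    · by_cases hg2 : g i = 2
      · simp [hc, hr, hg2]
      · by_cases hg3 : g i = 3
        · simp [hc, hr, hg3]
        · simp [hc, hr, hg2, hg3]
    · simp [hc, hr]
  · simp [hc]

-- B's counter loop keyed through k, looked up at t: the count of indices with key t.
theorem getD_foldl_insert_key {K : Type} [BEq K] [LawfulBEq K] [DecidableEq K] (l : List Int) (k : Int → K)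
    (d : PySem.Dict K Int) (t : K) :
    (l.foldl (fun d i => d.insert (k i) (d.getD (k i) 0 + 1)) d).getD t 0
      = d.getD t 0 + ((l.map k).count t : Int) := by
  induction l generalizing d with
  | nil => simp
  | cons x xs ih =>
    simp only [List.foldl_cons, List.map_cons]
    rw [ih, PySem.Dict.getD_insert]
    by_cases h : t = k x
    · rw [if_pos h, h, List.count_cons_self]
      push_cast
      ring
    · rw [if_neg h, List.count_cons_of_ne (Ne.symm h)]

-- ===== VERDICT (by name: the statement is the Claim_ definition above) =====
theorem choicereward_counting_spec : Claim_equal_choicereward_counting := by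
  intro choiceHistory rewardHistory num _dom _pre
  unfold Spec_choicereward_counting choicereward_counting choicereward_counting_alt
  by_cases h0 : num = 0
  · simp only [h0, beq_self_eq_true, if_true]
    rw [PySem.List.foldl_pyRange_zero_pyGetD' choiceHistory 0
        (fun (lr : Int × Int) v => if v == 2 then (lr.1 + 1, lr.2)
          else if v == 3 then (lr.1, lr.2 + 1) else lr) (0, 0)]
    rw [foldA_counts choiceHistory (fun x => x) 2 3 (by decide) 0 0]
    simp [PySem.List.count_eq]
  · simp only [beq_iff_eq, if_neg h0]
    rw [foldA_nested _
      (fun i => PySem.List.slice choiceHistory (some i) (some (i + num)))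
      (fun i => PySem.List.slice rewardHistory (some i) (some (i + num)))
      (fun i => PySem.List.pyGetD choiceHistory (i + num) 0)
      (PySem.List.slice choiceHistory (some (-num)) none)
      (PySem.List.slice rewardHistory (some (-num)) none) 0 0]
    rw [getD_foldl_insert_key _
      (fun i => (PySem.List.slice choiceHistory (some i) (some (i + num)),
                 PySem.List.slice rewardHistory (some i) (some (i + num)),
                 PySem.List.pyGetD choiceHistory (i + num) 0)) PySem.Dict.empty,
      getD_foldl_insert_key _
      (fun i => (PySem.List.slice choiceHistory (some i) (some (i + num)),
                 PySem.List.slice rewardHistory (some i) (some (i + num)),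
                 PySem.List.pyGetD choiceHistory (i + num) 0)) PySem.Dict.empty]
    simp
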